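-- pv_equiv track=rewrite | github.com/AndreAmaduzzi/advent_of_code | 2024/Day_20/main.py | calc_cheats
-- ===== SOURCE A (Python) =====
-- direction = {
--    "<": (-1,0),
--    ">": (1,0),
--    "^": (0,-1),
--    "v": (0,1)
-- }
--
-- def calc_cheats(map, score, path, x, y, target):
--    cheats = 0
--    for i, dir in enumerate(path):
--
--       if map[y-1][x] == "#":
--          if (x, y-2) in score:
--             if score[(x, y-2)] - score[(x, y)] - 2 >= target:
--                cheats += 1
--       if map[y+1][x] == "#":
--          if (x, y+2) in score:
--             if score[(x, y+2)] - score[(x, y)] - 2 >= target: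
--                cheats += 1
--       if map[y][x-1] == "#":
--          if (x-2, y) in score:
--             if score[(x-2, y)] - score[(x, y)] - 2 >= target:
--                cheats += 1
--       if map[y][x+1] == "#":
--          if (x+2, y) in score:
--             if score[(x+2, y)] - score[(x, y)] - 2 >= target:
--                cheats += 1
--       dx, dy = direction[dir]
--       x += dx
--       y += dy
--    return cheats
-- ===== SOURCE B (Python) =====
-- DELTAS = {"<": (-1, 0), ">": (1, 0), "^": (0, -1), "v": (0, 1)}
-- # (wall offset, jump offset) for the four axis directions, in A's check order
-- CHECKS = (((0, -1), (0, -2)), ((0, 1), (0, 2)), ((-1, 0), (-2, 0)), ((1, 0), (2, 0)))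
--
-- def calc_cheats(map, score, path, x, y, target):
--     # one pass: tally the visited cells with multiplicities
--     counts = {}
--     px, py = x, y
--     for d in path:
--         counts[(px, py)] = counts.get((px, py), 0) + 1
--         dx, dy = DELTAS[d]
--         px, py = px + dx, py + dy
--
--     def cell(px, py):
--         n = 0
--         for (wx, wy), (jx, jy) in CHECKS:
--             if map[py + wy][px + wx] == "#" and (px + jx, py + jy) in score:
--                 if score[(px + jx, py + jy)] - score[(px, py)] - 2 >= target:
--                     n += 1
--         return n
--
--     # each distinct cell is inspected once, weighted by how often the walk hits it
--     return sum(m * cell(px, py) for (px, py), m in counts.items())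
-- ===== Notes on version B (the rewrite author's own statement) =====
-- stated objective: alternative
-- what changed: Replaces A's stateful walk-and-check loop (position and count threaded through one fold over enumerate(path)) by first tallying the visited cells into a count dictionary, then summing multiplicity times a table-driven four-direction check over each distinct cell once.
import Mathlib
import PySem

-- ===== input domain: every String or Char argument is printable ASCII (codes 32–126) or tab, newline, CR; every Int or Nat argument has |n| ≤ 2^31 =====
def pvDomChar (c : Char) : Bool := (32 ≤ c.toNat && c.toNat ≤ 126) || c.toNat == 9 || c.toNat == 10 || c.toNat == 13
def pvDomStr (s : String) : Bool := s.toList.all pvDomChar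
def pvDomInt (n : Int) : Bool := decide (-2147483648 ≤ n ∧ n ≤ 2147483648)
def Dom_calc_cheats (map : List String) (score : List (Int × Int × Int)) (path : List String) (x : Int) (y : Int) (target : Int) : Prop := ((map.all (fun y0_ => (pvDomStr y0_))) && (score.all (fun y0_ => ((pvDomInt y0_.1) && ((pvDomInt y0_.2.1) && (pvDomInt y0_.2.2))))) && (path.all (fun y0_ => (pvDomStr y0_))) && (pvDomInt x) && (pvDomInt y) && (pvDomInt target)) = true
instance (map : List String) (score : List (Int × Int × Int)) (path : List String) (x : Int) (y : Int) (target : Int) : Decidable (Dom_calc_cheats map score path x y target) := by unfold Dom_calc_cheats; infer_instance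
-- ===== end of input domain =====

-- B replaces A's stateful walk-and-check loop by a visit-count dictionary over the walk cells,
-- inspecting each distinct cell once with a table-driven four-direction check (objective: alternative).

-- shared primitives (Python composites): map[yy][xx], '(kx,ky) in score', score[(kx,ky)]
def pvCharAt (map : List String) (yy xx : Int) : Option Char :=
  match PySem.List.pyGet? map yy with
  | some row => PySem.Str.pyGet? row xx
  | none => none

def pvHasKey (score : List (Int × Int × Int)) (kx ky : Int) : Bool :=
  score.any (fun e => e.1 == kx && e.2.1 == ky)

def pvScoreGet? (score : List (Int × Int × Int)) (kx ky : Int) : Option Int :=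
  (score.find? (fun e => e.1 == kx && e.2.1 == ky)).map (·.2.2)

-- the module-level `direction` table ((0,1) also stands for keys A raises KeyError on; Pre_ excludes those)
def pvDelta (s : String) : Int × Int :=
  if s = "<" then (-1, 0) else if s = ">" then (1, 0) else if s = "^" then (0, -1) else (0, 1)

-- ===== PORT A =====
def calc_cheats (map : List String) (score : List (Int × Int × Int)) (path : List String) (x : Int) (y : Int) (target : Int) : Int :=
  (((PySem.List.enumerate path).foldl (fun (st : Int × Int × Int) (pr : Int × String) =>
      let cheats := st.1
      let x := st.2.1
      let y := st.2.2
      let dir := pr.2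
      let cheats := if pvCharAt map (y-1) x = some '#' then
          (if pvHasKey score x (y-2) then
            (if (pvScoreGet? score x (y-2)).getD 0 - (pvScoreGet? score x y).getD 0 - 2 ≥ target then cheats + 1 else cheats)
          else cheats)
        else cheats
      let cheats := if pvCharAt map (y+1) x = some '#' then
          (if pvHasKey score x (y+2) then
            (if (pvScoreGet? score x (y+2)).getD 0 - (pvScoreGet? score x y).getD 0 - 2 ≥ target then cheats + 1 else cheats)
          else cheats)
        else cheats
      let cheats := if pvCharAt map y (x-1) = some '#' then
          (if pvHasKey score (x-2) y then
            (if (pvScoreGet? score (x-2) y).getD 0 - (pvScoreGet? score x y).getD 0 - 2 ≥ target then cheats + 1 else cheats)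
          else cheats)
        else cheats
      let cheats := if pvCharAt map y (x+1) = some '#' then
          (if pvHasKey score (x+2) y then
            (if (pvScoreGet? score (x+2) y).getD 0 - (pvScoreGet? score x y).getD 0 - 2 ≥ target then cheats + 1 else cheats)
          else cheats)
        else cheats
      let d := pvDelta dir
      (cheats, x + d.1, y + d.2)) ((0 : Int), x, y)).1)

-- ===== PORT B =====
-- the CHECKS table: (wall offset, jump offset) in A's order
def pvChecks : List ((Int × Int) × (Int × Int)) :=
  [((0, -1), (0, -2)), ((0, 1), (0, 2)), ((-1, 0), (-2, 0)), ((1, 0), (2, 0))]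

def pvCell (map : List String) (score : List (Int × Int × Int)) (target px py : Int) : Int :=
  pvChecks.foldl (fun n pr =>
    if pvCharAt map (py + pr.1.2) (px + pr.1.1) = some '#' ∧ pvHasKey score (px + pr.2.1) (py + pr.2.2) then
      (if (pvScoreGet? score (px + pr.2.1) (py + pr.2.2)).getD 0 - (pvScoreGet? score px py).getD 0 - 2 ≥ target then n + 1 else n)
    else n) 0

def calc_cheats_alt (map : List String) (score : List (Int × Int × Int)) (path : List String) (x : Int) (y : Int) (target : Int) : Int :=
  let st := path.foldl (fun (st : PySem.Dict (Int × Int) Int × Int × Int) (d : String) =>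
      let counts := st.1
      let px := st.2.1
      let py := st.2.2
      let counts := counts.insert (px, py) (counts.getD (px, py) 0 + 1)
      let dl := pvDelta d
      (counts, px + dl.1, py + dl.2)) (PySem.Dict.empty, x, y)
  (st.1.items.map (fun pr => pr.2 * pvCell map score target pr.1.1 pr.1.2)).sum

-- ===== PRECONDITION & SPEC =====
-- the cells the loop inspects: current position at the start of each iteration
def pvWalk (path : List String) (x y : Int) : List (Int × Int) :=
  match path with
  | [] => []
  | d :: rest => (x, y) :: pvWalk rest (x + (pvDelta d).1) (y + (pvDelta d).2)

-- one loop step raises no exception at cell (px, py)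
def pvStepOK (map : List String) (score : List (Int × Int × Int)) (px py : Int) : Prop :=
  (pvCharAt map (py-1) px).isSome ∧ (pvCharAt map (py+1) px).isSome ∧
  (pvCharAt map py (px-1)).isSome ∧ (pvCharAt map py (px+1)).isSome ∧
  (((pvCharAt map (py-1) px = some '#' ∧ pvHasKey score px (py-2) = true) ∨
    (pvCharAt map (py+1) px = some '#' ∧ pvHasKey score px (py+2) = true) ∨
    (pvCharAt map py (px-1) = some '#' ∧ pvHasKey score (px-2) py = true) ∨
    (pvCharAt map py (px+1) = some '#' ∧ pvHasKey score (px+2) py = true)) →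
      pvHasKey score px py = true)

-- Pre_ = exactly where A raises no exception: every path entry is a direction key
-- (else KeyError), and at every visited cell the four neighbour reads are in range
-- (else IndexError) and score[(x,y)] exists whenever some branch looks it up (else KeyError).
def Pre_calc_cheats (map : List String) (score : List (Int × Int × Int)) (path : List String) (x : Int) (y : Int) (target : Int) : Prop :=
  (∀ s ∈ path, s = "<" ∨ s = ">" ∨ s = "^" ∨ s = "v") ∧
  (∀ p ∈ pvWalk path x y, pvStepOK map score p.1 p.2)

instance (map : List String) (score : List (Int × Int × Int)) (path : List String) (x : Int) (y : Int) (target : Int) : Decidable (Pre_calc_cheats map score path x y target) := by unfold Pre_calc_cheats pvStepOK; infer_instance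

def pvWitness_calc_cheats : List String × (List (Int × Int × Int)) × List String × Int × Int × Int :=
  (["#####", "#...#", "#####"], [(1, 1, 0), (2, 1, 1), (3, 1, 2)], [">", ">"], 1, 1, 0)

def Spec_calc_cheats (map : List String) (score : List (Int × Int × Int)) (path : List String) (x : Int) (y : Int) (target : Int) (out : Int) : Prop := out = calc_cheats_alt map score path x y target
instance (map : List String) (score : List (Int × Int × Int)) (path : List String) (x : Int) (y : Int) (target : Int) (out : Int) : Decidable (Spec_calc_cheats map score path x y target out) := by unfold Spec_calc_cheats; infer_instance

-- ===== CLAIM (what is proved, stated in full; the proofs are below) =====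
def Claim_equal_calc_cheats : Prop := ∀ (map : List String) (score : List (Int × Int × Int)) (path : List String) (x : Int) (y : Int) (target : Int), Dom_calc_cheats map score path x y target → Pre_calc_cheats map score path x y target → Spec_calc_cheats map score path x y target (calc_cheats map score path x y target)

-- ===== LEMMAS AND PROOFS =====

theorem gC (c : Prop) [Decidable c] (m u : Int) :
    (if c then m + u else m) = m + (if c then u else 0) := by split_ifs <;> omega

theorem gD (c k : Prop) [Decidable c] [Decidable k] (u : Int) :
    (if c then (if k then u else 0) else 0) = (if c ∧ k then u else 0) := by
  split_ifs <;> simp_all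

-- A's loop body, named so the fold can be reasoned about
def pvStepA (map : List String) (score : List (Int × Int × Int)) (target : Int)
    (st : Int × Int × Int) (pr : Int × String) : Int × Int × Int :=
  let cheats := st.1
  let x := st.2.1
  let y := st.2.2
  let dir := pr.2
  let cheats := if pvCharAt map (y-1) x = some '#' then
      (if pvHasKey score x (y-2) then
        (if (pvScoreGet? score x (y-2)).getD 0 - (pvScoreGet? score x y).getD 0 - 2 ≥ target then cheats + 1 else cheats)
      else cheats)
    else cheats
  let cheats := if pvCharAt map (y+1) x = some '#' then
      (if pvHasKey score x (y+2) then
        (if (pvScoreGet? score x (y+2)).getD 0 - (pvScoreGet? score x y).getD 0 - 2 ≥ target then cheats + 1 else cheats)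
      else cheats)
    else cheats
  let cheats := if pvCharAt map y (x-1) = some '#' then
      (if pvHasKey score (x-2) y then
        (if (pvScoreGet? score (x-2) y).getD 0 - (pvScoreGet? score x y).getD 0 - 2 ≥ target then cheats + 1 else cheats)
      else cheats)
    else cheats
  let cheats := if pvCharAt map y (x+1) = some '#' then
      (if pvHasKey score (x+2) y then
        (if (pvScoreGet? score (x+2) y).getD 0 - (pvScoreGet? score x y).getD 0 - 2 ≥ target then cheats + 1 else cheats)
      else cheats)
    else cheats
  let d := pvDelta dir
  (cheats, x + d.1, y + d.2)

theorem calc_cheats_eq_foldA (map : List String) (score : List (Int × Int × Int)) (path : List String) (x y target : Int) :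
    calc_cheats map score path x y target
      = ((PySem.List.enumerate path 0).foldl (pvStepA map score target) (0, x, y)).1 := rfl

theorem pvStepA_fst (map : List String) (score : List (Int × Int × Int)) (target : Int)
    (c x y : Int) (pr : Int × String) :
    (pvStepA map score target (c, x, y) pr).1 = c + pvCell map score target x y := by
  simp only [pvStepA, pvCell, pvChecks, List.foldl, gC, gD]
  ring_nf
  simp only [and_assoc]

theorem pvStepA_snd (map : List String) (score : List (Int × Int × Int)) (target : Int)
    (c x y : Int) (pr : Int × String) :
    (pvStepA map score target (c, x, y) pr).2 = (x + (pvDelta pr.2).1, y + (pvDelta pr.2).2) := rfl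

theorem foldA_eq (map : List String) (score : List (Int × Int × Int)) (target : Int) :
    ∀ (path : List String) (s c x y : Int),
      ((PySem.List.enumerate path s).foldl (pvStepA map score target) (c, x, y)).1
        = c + ((pvWalk path x y).map (fun p => pvCell map score target p.1 p.2)).sum := by
  intro path
  induction path with
  | nil => intro s c x y; simp [PySem.List.enumerate_nil, pvWalk]
  | cons d rest ih =>
    intro s c x y
    rw [PySem.List.enumerate_cons, List.foldl_cons]
    have hst : pvStepA map score target (c, x, y) (s, d)
        = (c + pvCell map score target x y, x + (pvDelta d).1, y + (pvDelta d).2) := by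
      have h1 := pvStepA_fst map score target c x y (s, d)
      have h2 := pvStepA_snd map score target c x y (s, d)
      exact Prod.ext h1 h2
    rw [hst, ih (s+1)]
    simp [pvWalk]
    ring

-- B's counting loop, named
def pvStepB (st : PySem.Dict (Int × Int) Int × Int × Int) (d : String) :
    PySem.Dict (Int × Int) Int × Int × Int :=
  let counts := st.1
  let px := st.2.1
  let py := st.2.2
  let counts := counts.insert (px, py) (counts.getD (px, py) 0 + 1)
  let dl := pvDelta d
  (counts, px + dl.1, py + dl.2)

theorem calc_cheats_alt_eq_foldB (map : List String) (score : List (Int × Int × Int)) (path : List String) (x y target : Int) :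
    calc_cheats_alt map score path x y target
      = (((path.foldl pvStepB (PySem.Dict.empty, x, y)).1).items.map
          (fun pr => pr.2 * pvCell map score target pr.1.1 pr.1.2)).sum := rfl

theorem foldB_eq : ∀ (path : List String) (d : PySem.Dict (Int × Int) Int) (x y : Int),
    (path.foldl pvStepB (d, x, y)).1
      = (pvWalk path x y).foldl (fun dd p => dd.insert p (dd.getD p 0 + 1)) d := by
  intro path
  induction path with
  | nil => intro d x y; simp [pvWalk]
  | cons s rest ih =>
    intro d x y
    rw [List.foldl_cons]
    show (rest.foldl pvStepB
        (d.insert (x, y) (d.getD (x, y) 0 + 1), x + (pvDelta s).1, y + (pvDelta s).2)).1 = _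
    rw [ih]
    simp [pvWalk]

-- weighted sum over the counter = plain sum over the list
theorem counter_weighted_sum (xs : List (Int × Int)) (f : Int × Int → Int) :
    ((PySem.Dict.counter xs).items.map (fun pr => pr.2 * f pr.1)).sum = (xs.map f).sum := by
  rw [PySem.Dict.items_counter, List.map_map]
  have hnd : (PySem.Set.ofList xs).Nodup := PySem.Set.nodup_ofList xs
  have h1 : ((PySem.Set.ofList xs).map (fun k => (xs.count k : Int) * f k)).sum
      = ∑ k ∈ (PySem.Set.ofList xs).toFinset, (xs.count k : Int) * f k :=
    (List.sum_toFinset _ hnd).symm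
  have h2 : (PySem.Set.ofList xs).toFinset = xs.toFinset := by
    ext k; simp [PySem.Set.mem_ofList]
  have h3 := Finset.sum_multiset_map_count (xs : Multiset (Int × Int)) f
  simp at h3
  have hc : ∀ k : Int × Int, @List.count _ instBEqProd k xs = @List.count _ instBEqOfDecidableEq k xs := by
    intro k
    simp only [List.count_eq_countP]
    apply List.countP_congr
    intro a _
    simp [beq_eq_decide]
  calc ((PySem.Set.ofList xs).map ((fun pr => pr.2 * f pr.1) ∘ fun k => (k, (xs.count k : Int)))).sum
      = ((PySem.Set.ofList xs).map (fun k => (xs.count k : Int) * f k)).sum := rfl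
    _ = ∑ k ∈ (PySem.Set.ofList xs).toFinset, (xs.count k : Int) * f k := h1
    _ = ∑ k ∈ xs.toFinset, (xs.count k : Int) * f k := by rw [h2]
    _ = (xs.map f).sum := by rw [← h3.symm]; exact Finset.sum_congr rfl (fun k _ => by rw [hc k])

-- ===== VERDICT (by name: the statement is the Claim_ definition above) =====
theorem calc_cheats_spec : Claim_equal_calc_cheats := by
  intro map score path x y target _ _
  unfold Spec_calc_cheats
  rw [calc_cheats_eq_foldA, calc_cheats_alt_eq_foldB, foldB_eq,
    PySem.Dict.foldl_insert_getD_add_one_eq_counter]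
  have hsum := counter_weighted_sum (pvWalk path x y) (fun p => pvCell map score target p.1 p.2)
  beta_reduce at hsum
  rw [hsum, foldA_eq]
  simp
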